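-- pv_equiv track=rewrite | github.com/Simars80/VaxAI-Vision | backend/app/services/cascade_simulator.py | _downstream_affected
-- ===== SOURCE A (Python) =====
-- from collections import defaultdict, deque
--
-- def _downstream_affected(
--
--     disrupted_nodes: set[str],
--     children: dict[str, list[str]],
-- ) -> set[str]:
--     """BFS from disrupted nodes to collect all reachable downstream nodes.
--
--     Args:
--         disrupted_nodes: Starting set (the directly disrupted nodes).
--         children: Adjacency list from :meth:`_build_adjacency` (modified graph).
--
--     Returns:
--         Set of all node IDs reachable from any disrupted node (inclusive).
--     """
--     visited: set[str] = set(disrupted_nodes)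
--     queue: deque[str] = deque(disrupted_nodes)
--
--     while queue:
--         current = queue.popleft()
--         for child in children.get(current, []):
--             if child not in visited:
--                 visited.add(child)
--                 queue.append(child)
--
--     return visited
-- ===== SOURCE B (Python) =====
-- def _downstream_affected(
--     disrupted_nodes: set[str],
--     children: dict[str, list[str]],
-- ) -> set[str]:
--     """Fixed-point saturation: sweep the whole visited set over and over,
--     adding every child of every visited node, until a sweep adds nothing.
--     No queue/frontier is maintained."""
--     visited: set[str] = set(disrupted_nodes)
--     while True:
--         before = len(visited)
--         for node in list(visited):
--             for child in children.get(node, []):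
--                 visited.add(child)
--         if len(visited) == before:
--             return visited
-- ===== Notes on version B (the rewrite author's own statement) =====
-- stated objective: alternative
-- what changed: Replaced the deque-based BFS with a worklist-free fixed-point saturation: repeatedly sweep the entire visited set, adding every child of every visited node, until a sweep adds nothing; no queue or frontier is maintained. Pre_ only requires the disrupted_nodes list to have no duplicate entries, which is automatic for the set-typed parameter.
import Mathlib
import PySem

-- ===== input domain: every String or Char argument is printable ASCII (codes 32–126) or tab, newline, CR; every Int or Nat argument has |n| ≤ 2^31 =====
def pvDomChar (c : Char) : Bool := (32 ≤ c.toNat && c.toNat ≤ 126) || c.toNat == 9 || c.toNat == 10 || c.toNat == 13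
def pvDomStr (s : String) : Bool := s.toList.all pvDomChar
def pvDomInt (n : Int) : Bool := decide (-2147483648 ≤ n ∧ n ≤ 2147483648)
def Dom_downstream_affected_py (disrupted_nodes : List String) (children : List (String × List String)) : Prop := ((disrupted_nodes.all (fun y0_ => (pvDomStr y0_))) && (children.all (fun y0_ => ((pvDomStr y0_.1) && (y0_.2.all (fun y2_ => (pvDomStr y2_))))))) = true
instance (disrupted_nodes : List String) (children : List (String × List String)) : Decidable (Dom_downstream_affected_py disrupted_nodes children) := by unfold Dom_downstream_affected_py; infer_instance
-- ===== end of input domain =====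

-- B replaces the deque-based BFS by a worklist-free fixed-point saturation (repeated sweeps of the
-- whole visited set until a sweep adds nothing); same resulting set, no queue/frontier maintained.

-- ===== shared helpers (children.get(node, []) and facts the ports' termination proofs cite) =====

-- children.get(node, []) — first-match lookup in the association list
def pvGetChildren (children : List (String × List String)) (node : String) : List String :=
  PySem.Dict.getD (PySem.Dict.mk children) node []

-- all strings occurring as children anywhere in the dict
def pvAllKids (children : List (String × List String)) : List String :=
  (children.map Prod.snd).flatten

-- the elements a left-to-right "add if unseen" pass over cs appends to v
def pvNew (v : List String) : List String → List String
  | [] => []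
  | c :: cs => if c ∈ v then pvNew v cs else c :: pvNew (v ++ [c]) cs

-- loop body of A's inner `for child in …` (visited, queue) update
def pvPush (p : List String × List String) (c : String) : List String × List String :=
  if c ∈ p.1 then p else (p.1 ++ [c], p.2 ++ [c])

-- the new elements one whole sweep appends, node by node
def pvNewL (children : List (String × List String)) (v : List String) : List String → List String
  | [] => []
  | x :: xs =>
    pvNew v (pvGetChildren children x) ++
      pvNewL children (v ++ pvNew v (pvGetChildren children x)) xs

-- termination measure: how many candidate nodes are still missing from V
def pvMeasure (children : List (String × List String)) (V : List String) : Nat :=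
  ((pvAllKids children ++ V).toFinset.card + 1) - V.toFinset.card

theorem pvPushFold_eq (cs : List String) : ∀ v q,
    cs.foldl pvPush (v, q) = (v ++ pvNew v cs, q ++ pvNew v cs) := by
  induction cs with
  | nil => simp [pvNew]
  | cons c cs ih =>
    intro v q
    by_cases h : c ∈ v <;>
      simp [pvPush, pvNew, h, ih, List.append_assoc]

theorem pvAddFold_eq (cs : List String) : ∀ v,
    cs.foldl PySem.Set.add v = v ++ pvNew v cs := by
  induction cs with
  | nil => simp [pvNew]
  | cons c cs ih =>
    intro v
    by_cases h : c ∈ v <;>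
      simp [PySem.Set.add, PySem.Set.contains, pvNew, h, ih, List.append_assoc]

theorem pvScanFold_eq (children : List (String × List String)) (L : List String) : ∀ v,
    L.foldl (fun acc node => (pvGetChildren children node).foldl PySem.Set.add acc) v
      = v ++ pvNewL children v L := by
  induction L with
  | nil => simp [pvNewL]
  | cons x xs ih =>
    intro v
    rw [List.foldl_cons]
    show List.foldl _ ((pvGetChildren children x).foldl PySem.Set.add v) xs = _
    rw [pvAddFold_eq, ih]
    simp [pvNewL, List.append_assoc]

theorem pvNew_mem (cs : List String) : ∀ v x, x ∈ pvNew v cs → x ∉ v ∧ x ∈ cs := by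
  induction cs with
  | nil => simp [pvNew]
  | cons c cs ih =>
    intro v x hx
    by_cases h : c ∈ v
    · simp [pvNew, h] at hx
      rcases ih v x hx with ⟨h1, h2⟩
      exact ⟨h1, by simp [h2]⟩
    · simp [pvNew, h] at hx
      rcases hx with rfl | hx
      · exact ⟨h, by simp⟩
      · rcases ih (v ++ [c]) x hx with ⟨h1, h2⟩
        simp at h1
        exact ⟨h1.1, by simp [h2]⟩

theorem pvGet_sub (children : List (String × List String)) (x c : String)
    (h : c ∈ pvGetChildren children x) : c ∈ pvAllKids children := by
  induction children with
  | nil => simp [pvGetChildren, PySem.Dict.getD, PySem.Dict.get?] at h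
  | cons p ps ih =>
    obtain ⟨k, vs⟩ := p
    simp only [pvGetChildren, PySem.Dict.getD, PySem.Dict.get?_mk_cons] at h
    by_cases hk : (k == x) = true
    · simp [hk] at h
      simp [pvAllKids]
      exact Or.inl h
    · simp [hk] at h
      have := ih h
      simp [pvAllKids] at this ⊢
      exact Or.inr this

theorem pvNewL_mem (children : List (String × List String)) (L : List String) : ∀ v x,
    x ∈ pvNewL children v L → x ∉ v ∧ x ∈ pvAllKids children := by
  induction L with
  | nil => simp [pvNewL]
  | cons y ys ih =>
    intro v x hx
    simp only [pvNewL, List.mem_append] at hx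
    rcases hx with hx | hx
    · rcases pvNew_mem _ _ _ hx with ⟨h1, h2⟩
      exact ⟨h1, pvGet_sub children y x h2⟩
    · rcases ih _ _ hx with ⟨h1, h2⟩
      simp at h1
      exact ⟨h1.1, h2⟩

theorem pvMeasure_lt (children : List (String × List String)) (V e : List String)
    (he : e ≠ []) (hfresh : ∀ x ∈ e, x ∉ V) (hsub : ∀ x ∈ e, x ∈ pvAllKids children) :
    pvMeasure children (V ++ e) < pvMeasure children V := by
  have hset : (pvAllKids children ++ (V ++ e)).toFinset = (pvAllKids children ++ V).toFinset := by
    ext a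
    simp only [List.toFinset_append, Finset.mem_union, List.mem_toFinset]
    constructor
    · rintro (h | h | h)
      · exact Or.inl h
      · exact Or.inr h
      · exact Or.inl (hsub a h)
    · rintro (h | h)
      · exact Or.inl h
      · exact Or.inr (Or.inl h)
  have hlt : V.toFinset.card < (V ++ e).toFinset.card := by
    apply Finset.card_lt_card
    constructor
    · intro a ha
      simp at ha ⊢
      exact Or.inl ha
    · intro hsubs
      rcases List.exists_mem_of_ne_nil e he with ⟨x, hx⟩
      have : x ∈ V.toFinset := hsubs (by simp [hx])
      simp at this
      exact hfresh x hx this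
  have hle : V.toFinset.card ≤ (pvAllKids children ++ V).toFinset.card :=
    Finset.card_le_card (by intro a ha; simp at ha ⊢; exact Or.inr ha)
  have hle2 : (V ++ e).toFinset.card ≤ (pvAllKids children ++ (V ++ e)).toFinset.card :=
    Finset.card_le_card (by intro a ha; simp at ha ⊢; tauto)
  unfold pvMeasure
  rw [hset] at hle2 ⊢
  omega

-- ===== PORT A =====
-- visited = set(disrupted_nodes); queue = deque(disrupted_nodes); while queue: pop, push unseen children
def pvBfs (children : List (String × List String)) (V Q : List String) : List String :=
  match Q with
  | [] => V
  | x :: rest =>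
    let s := (pvGetChildren children x).foldl pvPush (V, rest)
    pvBfs children s.1 s.2
termination_by (pvMeasure children V, Q.length)
decreasing_by
  simp only [pvPushFold_eq]
  rcases eq_or_ne (pvNew V (pvGetChildren children x)) [] with h | h
  · rw [h]
    simp only [List.append_nil]
    exact Prod.Lex.right _ (by simp)
  · exact Prod.Lex.left _ _ (pvMeasure_lt children V _ h
      (fun y hy => (pvNew_mem _ _ _ hy).1)
      (fun y hy => pvGet_sub children x y (pvNew_mem _ _ _ hy).2))

def downstream_affected_py (disrupted_nodes : List String) (children : List (String × List String)) : List String :=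
  pvBfs children (PySem.Set.ofList disrupted_nodes) disrupted_nodes

-- ===== PORT B =====
-- one sweep: for node in list(visited): for child in children.get(node, []): visited.add(child)
def pvScan (children : List (String × List String)) (V : List String) : List String :=
  V.foldl (fun acc node => (pvGetChildren children node).foldl PySem.Set.add acc) V

-- while True: before = len(visited); sweep; if len(visited) == before: return visited
def pvSat (children : List (String × List String)) (V : List String) : List String :=
  let V' := pvScan children V
  if V'.length = V.length then V' else pvSat children V'
termination_by pvMeasure children V
decreasing_by
  rename_i hne
  have hV' : pvScan children V = V ++ pvNewL children V V := pvScanFold_eq children V V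
  have hne' : ¬ (pvScan children V).length = V.length := hne
  rw [hV'] at hne'
  rw [hV']
  have hnil : pvNewL children V V ≠ [] := by
    intro h
    simp [h] at hne'
  exact pvMeasure_lt children V _ hnil
    (fun y hy => (pvNewL_mem _ _ _ _ hy).1)
    (fun y hy => (pvNewL_mem _ _ _ _ hy).2)

def downstream_affected_py_alt (disrupted_nodes : List String) (children : List (String × List String)) : List String :=
  pvSat children (PySem.Set.ofList disrupted_nodes)

-- ===== PRECONDITION & SPEC =====
-- disrupted_nodes encodes a Python set; Pre_ excludes lists with duplicate entries, which are not
-- valid encodings of the set-typed parameter.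
def Pre_downstream_affected_py (disrupted_nodes : List String) (children : List (String × List String)) : Prop :=
  disrupted_nodes.Nodup
instance (disrupted_nodes : List String) (children : List (String × List String)) : Decidable (Pre_downstream_affected_py disrupted_nodes children) := by unfold Pre_downstream_affected_py; infer_instance

def pvWitness_downstream_affected_py : List String × (List (String × List String)) :=
  (["a"], [("a", ["b", "c"]), ("b", ["d"])])

def Spec_downstream_affected_py (disrupted_nodes : List String) (children : List (String × List String)) (out : List String) : Prop := out = downstream_affected_py_alt disrupted_nodes children
instance (disrupted_nodes : List String) (children : List (String × List String)) (out : List String) : Decidable (Spec_downstream_affected_py disrupted_nodes children out) := by unfold Spec_downstream_affected_py; infer_instance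

-- ===== CLAIM (what is proved, stated in full; the proofs are below) =====
def Claim_equal_downstream_affected_py : Prop := ∀ (disrupted_nodes : List String) (children : List (String × List String)), Dom_downstream_affected_py disrupted_nodes children → Pre_downstream_affected_py disrupted_nodes children → Spec_downstream_affected_py disrupted_nodes children (downstream_affected_py disrupted_nodes children)

-- ===== LEMMAS AND PROOFS =====

theorem pvNew_covers (cs : List String) : ∀ v c, c ∈ cs → c ∈ v ++ pvNew v cs := by
  induction cs with
  | nil => simp
  | cons a cs ih =>
    intro v c hc
    by_cases h : a ∈ v
    · simp only [pvNew, if_pos h]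
      rcases List.mem_cons.mp hc with rfl | hc
      · simp [h]
      · exact ih v c hc
    · simp only [pvNew, if_neg h]
      rcases List.mem_cons.mp hc with rfl | hc
      · simp
      · have := ih (v ++ [a]) c hc
        simp at this ⊢
        tauto

theorem pvNew_nil_of_subset (cs : List String) (v : List String)
    (h : ∀ c ∈ cs, c ∈ v) : pvNew v cs = [] := by
  induction cs with
  | nil => simp [pvNew]
  | cons a cs ih =>
    have ha : a ∈ v := h a (by simp)
    simp only [pvNew, if_pos ha]
    exact ih (fun c hc => h c (by simp [hc]))

theorem pvNewL_append (children : List (String × List String)) (P : List String) : ∀ L v,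
    pvNewL children v (P ++ L)
      = pvNewL children v P ++ pvNewL children (v ++ pvNewL children v P) L := by
  induction P with
  | nil => simp [pvNewL]
  | cons x xs ih =>
    intro L v
    simp only [List.cons_append, pvNewL, ih, List.append_assoc]

theorem pvNewL_nil_of_sat (children : List (String × List String)) (P : List String) : ∀ v,
    (∀ x ∈ P, ∀ c ∈ pvGetChildren children x, c ∈ v) → pvNewL children v P = [] := by
  induction P with
  | nil => simp [pvNewL]
  | cons x xs ih =>
    intro v h
    have hnil : pvNew v (pvGetChildren children x) = [] :=
      pvNew_nil_of_subset _ _ (h x (by simp))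
    simp only [pvNewL, hnil, List.append_nil, List.nil_append]
    exact ih v (fun y hy => h y (by simp [hy]))

theorem pvNewL_closure (children : List (String × List String)) (L : List String) : ∀ v x c,
    x ∈ L → c ∈ pvGetChildren children x → c ∈ v ++ pvNewL children v L := by
  induction L with
  | nil => simp
  | cons y ys ih =>
    intro v x c hx hc
    rcases List.mem_cons.mp hx with rfl | hx
    · have := pvNew_covers (pvGetChildren children x) v c hc
      simp only [pvNewL, ← List.append_assoc]
      simp at this ⊢
      tauto
    · have := ih (v ++ pvNew v (pvGetChildren children y)) x c hx hc
      simp only [pvNewL, ← List.append_assoc]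
      exact this

theorem pvBfs_round (children : List (String × List String)) (L : List String) : ∀ acc V,
    pvBfs children V (L ++ acc)
      = pvBfs children (V ++ pvNewL children V L) (acc ++ pvNewL children V L) := by
  induction L with
  | nil => simp [pvNewL]
  | cons x xs ih =>
    intro acc V
    rw [List.cons_append, pvBfs, pvPushFold_eq]
    have h2 := ih (acc ++ pvNew V (pvGetChildren children x)) (V ++ pvNew V (pvGetChildren children x))
    simp only [pvNewL, List.append_assoc] at h2 ⊢
    exact h2

theorem pvMain (children : List (String × List String)) (k : Nat) : ∀ V P L,
    pvMeasure children V ≤ k → V = P ++ L →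
    (∀ x ∈ P, ∀ c ∈ pvGetChildren children x, c ∈ V) →
    pvBfs children V L = pvSat children V := by
  induction k with
  | zero =>
    intro V P L hk _ _
    exfalso
    have hle : V.toFinset.card ≤ (pvAllKids children ++ V).toFinset.card :=
      Finset.card_le_card (by intro a ha; simp at ha ⊢; exact Or.inr ha)
    unfold pvMeasure at hk
    omega
  | succ k ih =>
    intro V P L hk hVPL hsat
    subst hVPL
    have h1 : pvNewL children (P ++ L) P = [] :=
      pvNewL_nil_of_sat children P (P ++ L) hsat
    have hscan : pvScan children (P ++ L) = (P ++ L) ++ pvNewL children (P ++ L) L := by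
      unfold pvScan
      rw [pvScanFold_eq, pvNewL_append, h1]
      simp
    have hbfs : pvBfs children (P ++ L) L
        = pvBfs children ((P ++ L) ++ pvNewL children (P ++ L) L) (pvNewL children (P ++ L) L) := by
      have := pvBfs_round children L [] (P ++ L)
      simpa using this
    set N := pvNewL children (P ++ L) L with hN
    rcases eq_or_ne N [] with hnil | hne
    · rw [pvSat]
      simp only [hscan, hnil, List.append_nil]
      simp [hbfs, hnil, pvBfs]
    · have hfresh : ∀ y ∈ N, y ∉ (P ++ L) :=
        fun y hy => (pvNewL_mem _ _ _ _ hy).1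
      have hsub : ∀ y ∈ N, y ∈ pvAllKids children :=
        fun y hy => (pvNewL_mem _ _ _ _ hy).2
      have hlen : ¬ ((P ++ L) ++ N).length = (P ++ L).length := by
        simp only [List.length_append]
        have : N.length ≠ 0 := by
          simpa [List.length_eq_zero_iff] using hne
        omega
      have hmeas : pvMeasure children ((P ++ L) ++ N) < pvMeasure children (P ++ L) :=
        pvMeasure_lt children (P ++ L) N hne hfresh hsub
      have hstep := ih ((P ++ L) ++ N) (P ++ L) N (by omega) rfl
        (by
          intro x hx c hc
          rcases List.mem_append.mp hx with hP | hL
          · have := hsat x hP c hc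
            simp at this ⊢
            tauto
          · have := pvNewL_closure children L (P ++ L) x c hL hc
            rw [← hN] at this
            exact this)
      rw [hbfs, hstep]
      conv_rhs => rw [pvSat]
      simp only [hscan]
      rw [if_neg hlen]

-- ===== VERDICT (by name: the statement is the Claim_ definition above) =====
theorem downstream_affected_py_spec : Claim_equal_downstream_affected_py := by
  intro d ch _hdom hpre
  unfold Spec_downstream_affected_py downstream_affected_py downstream_affected_py_alt
  rw [PySem.Set.ofList_eq_self_of_nodup d hpre]
  exact pvMain ch (pvMeasure ch d) d [] d (le_refl _) (by simp) (by simp)
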